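-- pv_equiv track=rewrite | github.com/ChrisDito/QuIz-Kriptografi | Kriptografi/playfair.py | clean_decrypted_text
-- ===== SOURCE A (Python) =====
-- def clean_decrypted_text(text):
--     cleaned_text = ""
--     i = 0
--     while i < len(text):
--         cleaned_text += text[i]
--         if i + 1 < len(text) and text[i] == text[i + 1] and text[i + 1] == 'X':
--             i += 2  # Lewati huruf 'X' yang tidak relevan
--         else:
--             i += 1
--     return cleaned_text
-- ===== SOURCE B (Python) =====
-- def clean_decrypted_text(text):
--     # Run-based single pass: count each maximal run of 'X' and keep ceil(run/2) of them;
--     # all other characters are copied verbatim.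
--     pieces = []
--     run = 0
--     for ch in text:
--         if ch == 'X':
--             run += 1
--         else:
--             pieces.append('X' * ((run + 1) // 2))
--             pieces.append(ch)
--             run = 0
--     return ''.join(pieces) + 'X' * ((run + 1) // 2)
-- ===== Notes on version B (the rewrite author's own statement) =====
-- stated objective: faster
-- what changed: Replaces A's index/while loop that skips the partner of each doubled-pad pair (quadratic via repeated string concatenation) with a linear run-based pass that counts each maximal run of the pad letter and emits ceil(run/2) of it per run, copying other characters verbatim.
import Mathlib
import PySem

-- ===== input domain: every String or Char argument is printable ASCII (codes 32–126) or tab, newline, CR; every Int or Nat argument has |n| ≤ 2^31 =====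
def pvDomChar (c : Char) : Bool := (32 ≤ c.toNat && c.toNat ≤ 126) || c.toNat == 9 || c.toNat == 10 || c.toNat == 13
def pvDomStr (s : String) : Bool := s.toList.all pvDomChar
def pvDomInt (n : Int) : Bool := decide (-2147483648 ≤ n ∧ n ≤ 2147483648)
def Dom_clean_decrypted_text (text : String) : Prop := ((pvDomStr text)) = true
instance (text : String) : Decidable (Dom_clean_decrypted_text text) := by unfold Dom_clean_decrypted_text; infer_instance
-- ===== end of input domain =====

-- B replaces A's pair-skipping index loop with a run-based pass (ceil(run/2) X's per maximal run); objective: alternative.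


-- ===== PORT A =====
-- A's while loop over the index i: append text[i]; if text[i] == text[i+1] == 'X', skip two, else one.
def cdtLoopA : List Char → List Char
  | [] => []
  | [c] => [c]
  | c :: d :: rest =>
      if c = d ∧ d = 'X' then c :: cdtLoopA rest
      else c :: cdtLoopA (d :: rest)

def clean_decrypted_text (text : String) : String :=
  String.mk (cdtLoopA text.toList)

-- ===== PORT B =====
-- B's for loop: state = (pieces so far, current run of 'X'); flush ceil(run/2) X's at each non-'X' and at the end.
def cdtLoopB : List Char → List Char → Nat → (List Char × Nat)
  | [], acc, run => (acc, run)
  | ch :: rest, acc, run =>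
      if ch = 'X' then cdtLoopB rest acc (run + 1)
      else cdtLoopB rest (acc ++ List.replicate ((run + 1) / 2) 'X' ++ [ch]) 0

def clean_decrypted_text_alt (text : String) : String :=
  let r := cdtLoopB text.toList [] 0
  String.mk (r.1 ++ List.replicate ((r.2 + 1) / 2) 'X')

-- ===== PRECONDITION & SPEC =====
def Spec_clean_decrypted_text (text : String) (out : String) : Prop := out = clean_decrypted_text_alt text
instance (text : String) (out : String) : Decidable (Spec_clean_decrypted_text text out) := by unfold Spec_clean_decrypted_text; infer_instance

-- ===== CLAIM (what is proved, stated in full; the proofs are below) =====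
def Claim_equal_clean_decrypted_text : Prop := ∀ (text : String), Dom_clean_decrypted_text text → Spec_clean_decrypted_text text (clean_decrypted_text text)

-- ===== LEMMAS AND PROOFS =====

-- A on a non-'X' head just emits it.
theorem cdtLoopA_cons_ne {c : Char} (cs : List Char) (hc : c ≠ 'X') :
    cdtLoopA (c :: cs) = c :: cdtLoopA cs := by
  cases cs with
  | nil => rfl
  | cons d rest =>
      have : ¬ (c = d ∧ d = 'X') := by
        rintro ⟨h1, h2⟩; exact hc (h1.trans h2)
      simp [cdtLoopA, this]

-- A collapses a maximal run of k X's (followed by a non-'X' boundary) to ⌈k/2⌉ X's.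
theorem cdtLoopA_run : ∀ (k : Nat) (cs : List Char), cs.head? ≠ some 'X' →
    cdtLoopA (List.replicate k 'X' ++ cs) = List.replicate ((k + 1) / 2) 'X' ++ cdtLoopA cs
  | 0, cs, _ => by simp
  | 1, cs, h => by
      cases cs with
      | nil => rfl
      | cons d rest =>
          have hd : d ≠ 'X' := by intro he; exact h (by simp [he])
          have : ¬ ('X' = d ∧ d = 'X') := by rintro ⟨_, h2⟩; exact hd h2
          simp [cdtLoopA, this]
  | (k + 2), cs, h => by
      have ih := cdtLoopA_run k cs h
      have harith : (k + 2 + 1) / 2 = (k + 1) / 2 + 1 := by omega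
      simp only [List.replicate_succ, List.cons_append, cdtLoopA, harith, ih]
      simp

-- Loop invariant for B: flushing B's state reproduces A's output on the pending run plus the rest.
theorem cdtLoopB_invariant : ∀ (cs acc : List Char) (run : Nat),
    (cdtLoopB cs acc run).1 ++ List.replicate (((cdtLoopB cs acc run).2 + 1) / 2) 'X'
      = acc ++ cdtLoopA (List.replicate run 'X' ++ cs)
  | [], acc, run => by
      have h := cdtLoopA_run run [] (by simp)
      simp only [List.append_nil] at h
      simp [cdtLoopB, h, cdtLoopA]
  | ch :: rest, acc, run => by
      by_cases hx : ch = 'X'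
      · have ih := cdtLoopB_invariant rest acc (run + 1)
        have : List.replicate run 'X' ++ ch :: rest = List.replicate (run + 1) 'X' ++ rest := by
          subst hx
          simp [List.replicate_succ' (n := run)]
        simp only [cdtLoopB, if_pos hx, ih, this]
      · have ih := cdtLoopB_invariant rest (acc ++ List.replicate ((run + 1) / 2) 'X' ++ [ch]) 0
        have hrun : cdtLoopA (List.replicate run 'X' ++ ch :: rest)
            = List.replicate ((run + 1) / 2) 'X' ++ cdtLoopA (ch :: rest) :=
          cdtLoopA_run run (ch :: rest) (by simpa using hx)
        simp only [cdtLoopB, if_neg hx, ih, hrun, cdtLoopA_cons_ne rest hx]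
        simp

-- ===== VERDICT (by name: the statement is the Claim_ definition above) =====
theorem clean_decrypted_text_spec : Claim_equal_clean_decrypted_text := by
  intro text _
  unfold Spec_clean_decrypted_text clean_decrypted_text clean_decrypted_text_alt
  have h := cdtLoopB_invariant text.toList [] 0
  simp at h
  simp [h]
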